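-- pv_equiv track=rewrite | github.com/DF-wu/TreasureBox | SKILLS/df-meta-mcp/scripts/sync_catalog.py | important_notes
-- ===== SOURCE A (Python) =====
-- def important_notes(text: str) -> list[str]:
--     notes: list[str] = []
--     for raw in text.splitlines():
--         line = " ".join(raw.split()).strip()
--         if not line:
--             continue
--         upper = line.upper()
--         if any(token in upper for token in ["IMPORTANT", "MUST", "UNLESS", "DO NOT", "MAXIMUM", "MAX "]):
--             notes.append(line)
--     deduped: list[str] = []
--     seen = set()
--     for note in notes:
--         if note in seen:
--             continue
--         seen.add(note)
--         deduped.append(note)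
--     return deduped[:3]
-- ===== SOURCE B (Python) =====
-- def _first_match(lines):
--     for i, raw in enumerate(lines):
--         line = " ".join(raw.split()).strip()
--         if line and any(t in line.upper() for t in
--                         ("IMPORTANT", "MUST", "UNLESS", "DO NOT", "MAXIMUM", "MAX ")):
--             return line, lines[i + 1:]
--     return None
--
--
-- def _take(k, lines):
--     if k == 0:
--         return []
--     found = _first_match(lines)
--     if found is None:
--         return []
--     m, rest = found
--     return [m] + _take(k - 1, [raw for raw in rest if " ".join(raw.split()).strip() != m])
--
--
-- def important_notes(text: str) -> list[str]:
--     return _take(3, text.splitlines())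
-- ===== Notes on version B (the rewrite author's own statement) =====
-- stated objective: alternative
-- what changed: Selection-style recursion with no seen-set and no staged passes: repeatedly find the first matching normalized line, emit it, filter every duplicate of it out of the remaining raw lines, and recurse with a decremented count (3); dedup is achieved by filtering the input rather than by a membership set, and the recursion stops at the count instead of slicing.
import Mathlib
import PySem

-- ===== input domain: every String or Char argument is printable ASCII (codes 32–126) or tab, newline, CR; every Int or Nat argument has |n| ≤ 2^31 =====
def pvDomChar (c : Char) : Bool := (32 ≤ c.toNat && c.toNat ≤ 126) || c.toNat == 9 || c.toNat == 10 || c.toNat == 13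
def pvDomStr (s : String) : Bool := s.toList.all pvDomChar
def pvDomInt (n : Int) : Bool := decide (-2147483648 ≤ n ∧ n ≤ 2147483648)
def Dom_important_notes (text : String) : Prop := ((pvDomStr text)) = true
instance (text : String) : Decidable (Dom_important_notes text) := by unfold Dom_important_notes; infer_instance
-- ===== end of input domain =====

-- B replaces A's collect/seen-set-dedup/slice pipeline by a selection-style recursion with no set:
-- repeatedly take the FIRST matching normalized line, filter its duplicates out of the remaining
-- lines, and recurse with a decremented count (alternative algorithm, same O(n) cost).

-- ===== PORT A =====
def pvTokens : List String := ["IMPORTANT", "MUST", "UNLESS", "DO NOT", "MAXIMUM", "MAX "]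

def pvNorm (raw : String) : String :=
  PySem.Str.strip (PySem.Str.join " " (PySem.Str.split₀ raw))

def pvMatch (line : String) : Bool :=
  pvTokens.any (fun token => PySem.Str.isIn token (PySem.Str.upper line))

def important_notes (text : String) : List String :=
  let notes := (PySem.Str.splitlines text).foldl (fun acc raw =>
    let line := pvNorm raw
    if line = "" then acc
    else if pvMatch line then acc ++ [line] else acc) []
  let dedup := notes.foldl (fun (p : List String × PySem.Set String) note =>
    if PySem.Set.contains p.2 note then p
    else (p.1 ++ [note], PySem.Set.add p.2 note)) ([], PySem.Set.empty)
  PySem.List.slice dedup.1 none (some 3)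

-- ===== PORT B =====
def pvFirstMatch : List String → Option (String × List String)
  | [] => none
  | raw :: rest =>
    let line := pvNorm raw
    if line ≠ "" && pvMatch line then some (line, rest) else pvFirstMatch rest

def pvTake : Nat → List String → List String
  | 0, _ => []
  | k + 1, lines =>
    match pvFirstMatch lines with
    | none => []
    | some (m, rest) => m :: pvTake k (rest.filter (fun raw => pvNorm raw ≠ m))

def important_notes_alt (text : String) : List String :=
  pvTake 3 (PySem.Str.splitlines text)

-- ===== PRECONDITION & SPEC =====
def Spec_important_notes (text : String) (out : List String) : Prop := out = important_notes_alt text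
instance (text : String) (out : List String) : Decidable (Spec_important_notes text out) := by unfold Spec_important_notes; infer_instance

-- ===== CLAIM (what is proved, stated in full; the proofs are below) =====
def Claim_equal_important_notes : Prop := ∀ (text : String), Dom_important_notes text → Spec_important_notes text (important_notes text)

-- ===== LEMMAS AND PROOFS =====

-- the matching normalized lines, as a pure function of the line list
def pvNts : List String → List String
  | [] => []
  | raw :: rest =>
    let line := pvNorm raw
    if line = "" then pvNts rest
    else if pvMatch line then line :: pvNts rest else pvNts rest

-- order-preserving dedup against an already-seen set, as a pure function
def pvDd : List String → PySem.Set String → List String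
  | [], _ => []
  | n :: ns, s =>
    if PySem.Set.contains s n then pvDd ns s else n :: pvDd ns (PySem.Set.add s n)

lemma pvNotes_foldl (ls : List String) (acc : List String) :
    ls.foldl (fun acc raw =>
      let line := pvNorm raw
      if line = "" then acc
      else if pvMatch line then acc ++ [line] else acc) acc = acc ++ pvNts ls := by
  induction ls generalizing acc with
  | nil => simp [pvNts]
  | cons raw rest ih =>
    simp only [List.foldl_cons, pvNts]
    by_cases h1 : pvNorm raw = "" <;> by_cases h2 : pvMatch (pvNorm raw) = true <;>
      simp [h1, h2, ih]

lemma pvDedup_foldl (ns : List String) (acc : List String) (s : PySem.Set String) :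
    (ns.foldl (fun (p : List String × PySem.Set String) note =>
      if PySem.Set.contains p.2 note then p
      else (p.1 ++ [note], PySem.Set.add p.2 note)) (acc, s)).1 = acc ++ pvDd ns s := by
  induction ns generalizing acc s with
  | nil => simp [pvDd]
  | cons n rest ih =>
    simp only [List.foldl_cons, pvDd]
    by_cases h : PySem.Set.contains s n = true
    · rw [if_pos h, if_pos h, ih]
    · rw [if_neg h, if_neg h, ih]
      simp

-- pvFirstMatch finds exactly the head of pvNts
lemma pvFirstMatch_none (ls : List String) (h : pvFirstMatch ls = none) : pvNts ls = [] := by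
  induction ls with
  | nil => simp [pvNts]
  | cons raw rest ih =>
    simp only [pvFirstMatch] at h
    by_cases h1 : pvNorm raw = ""
    · simp [pvNts, h1]; exact ih (by simpa [h1] using h)
    · by_cases h2 : pvMatch (pvNorm raw) = true
      · simp [h1, h2] at h
      · simp [pvNts, h1, h2]; exact ih (by simpa [h1, h2] using h)

lemma pvFirstMatch_some (ls : List String) (m : String) (rest : List String)
    (h : pvFirstMatch ls = some (m, rest)) : pvNts ls = m :: pvNts rest := by
  induction ls with
  | nil => simp [pvFirstMatch] at h
  | cons raw tl ih =>
    simp only [pvFirstMatch] at h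
    by_cases h1 : pvNorm raw = ""
    · simp [pvNts, h1]; exact ih (by simpa [h1] using h)
    · by_cases h2 : pvMatch (pvNorm raw) = true
      · simp [h1, h2] at h
        obtain ⟨hm, ht⟩ := h
        subst hm; subst ht
        simp [pvNts, h1, h2]
      · simp [pvNts, h1, h2]; exact ih (by simpa [h1, h2] using h)

-- filtering the raw lines by normalized value filters pvNts
lemma pvNts_filter (ls : List String) (m : String) :
    pvNts (ls.filter (fun raw => pvNorm raw ≠ m)) = (pvNts ls).filter (fun n => n ≠ m) := by
  induction ls with
  | nil => simp [pvNts]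
  | cons raw rest ih =>
    simp only [ne_eq, decide_not] at ih ⊢
    by_cases hm : pvNorm raw = m
    · subst hm
      by_cases h1 : pvNorm raw = ""
      · simp only [List.filter_cons, decide_true, Bool.not_true, pvNts, h1, if_true]
        simpa [h1] using ih
      · by_cases h2 : pvMatch (pvNorm raw) = true
        · simp only [List.filter_cons, decide_true, Bool.not_true, pvNts, h1, h2,
            if_false, if_true, List.filter_cons_of_neg]
          simpa [h1, h2] using ih
        · simp only [List.filter_cons, decide_true, Bool.not_true, pvNts, h1, h2,
            if_false, if_true]
          simpa [h1, h2] using ih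
    · by_cases h1 : pvNorm raw = ""
      · have hne : ("" : String) ≠ m := by rw [← h1]; exact hm
        simp [List.filter_cons, pvNts, h1, hne, ih]
      · by_cases h2 : pvMatch (pvNorm raw) = true
        · simp [List.filter_cons, pvNts, h1, h2, hm, ih]
        · simp [List.filter_cons, pvNts, h1, h2, hm, ih]

-- pvDd depends on the seen set only through membership
lemma pvDd_congr (ns : List String) (s t : PySem.Set String)
    (h : ∀ x, PySem.Set.contains s x = PySem.Set.contains t x) :
    pvDd ns s = pvDd ns t := by
  induction ns generalizing s t with
  | nil => simp [pvDd]
  | cons n rest ih =>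
    simp only [pvDd, h n]
    by_cases hc : PySem.Set.contains t n = true
    · rw [if_pos hc, if_pos hc]
      exact ih s t h
    · rw [if_neg hc, if_neg hc]
      refine congrArg (n :: ·) (ih _ _ (fun x => ?_))
      by_cases hx : x = n
      · subst hx
        simp [PySem.Set.contains_iff, PySem.Set.mem_add]
      · have h1 : PySem.Set.contains (PySem.Set.add s n) x = PySem.Set.contains s x := by
          by_cases hs : PySem.Set.contains s x = true <;>
            simp_all [PySem.Set.mem_add]
        have h2 : PySem.Set.contains (PySem.Set.add t n) x = PySem.Set.contains t x := by
          by_cases hs : PySem.Set.contains t x = true <;>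
            simp_all [PySem.Set.mem_add]
        rw [h1, h2, h x]

-- dedup against a set with m added = dedup of the m-free list
lemma pvDd_add (ns : List String) (s : PySem.Set String) (m : String) :
    pvDd ns (PySem.Set.add s m) = pvDd (ns.filter (fun n => n ≠ m)) s := by
  induction ns generalizing s with
  | nil => simp [pvDd]
  | cons n rest ih =>
    by_cases hm : n = m
    · subst hm
      simp only [pvDd, List.filter_cons]
      simp [PySem.Set.mem_add, ih]
    · have hc : PySem.Set.contains (PySem.Set.add s m) n = PySem.Set.contains s n := by
        by_cases h : n ∈ s <;>
          simp [PySem.Set.mem_add, h, hm]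
      simp only [pvDd, List.filter_cons]
      rw [if_pos (show decide (n ≠ m) = true by simp [hm])]
      simp only [pvDd]
      rw [hc]
      by_cases h : PySem.Set.contains s n = true
      · rw [if_pos h, if_pos h]
        exact ih s
      · rw [if_neg h, if_neg h]
        refine congrArg (n :: ·) ?_
        rw [← ih (PySem.Set.add s n)]
        exact pvDd_congr rest _ _ (fun x => by
          by_cases hx : x ∈ s <;> by_cases hxm : x = m <;> by_cases hxn : x = n <;>
            simp_all [PySem.Set.mem_add])

-- main invariant: pvTake computes take of the deduped matches
lemma pvTake_eq (k : Nat) (ls : List String) :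
    pvTake k ls = (pvDd (pvNts ls) PySem.Set.empty).take k := by
  induction k generalizing ls with
  | zero => simp [pvTake]
  | succ k ih =>
    cases hfm : pvFirstMatch ls with
    | none => simp [pvTake, hfm, pvFirstMatch_none ls hfm, pvDd]
    | some p =>
      obtain ⟨m, rest⟩ := p
      have hn := pvFirstMatch_some ls m rest hfm
      have hempty : PySem.Set.contains (PySem.Set.empty : PySem.Set String) m = false := by
        simp [PySem.Set.empty]
      simp only [pvTake, hfm, hn, pvDd, hempty, Bool.false_eq_true, if_false, List.take_succ_cons]
      rw [ih, pvNts_filter, pvDd_add]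

-- ===== VERDICT (by name: the statement is the Claim_ definition above) =====
theorem important_notes_spec : Claim_equal_important_notes := by
  intro text _
  unfold Spec_important_notes important_notes important_notes_alt
  rw [pvTake_eq]
  simp only [pvNotes_foldl, List.nil_append, pvDedup_foldl]
  rw [PySem.List.slice_to _ (by norm_num)]
  simp
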